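-- pv_equiv track=rewrite | github.com/liaolc/RL-Gammon | backgammon_muzero_net.py | index_to_dice
-- ===== SOURCE A (Python) =====
-- def index_to_dice(idx):
--     """Convert index to dice roll."""
--     count = 0
--     for high in range(1, 7):
--         for low in range(1, high + 1):
--             if count == idx:
--                 return (high, low)
--             count += 1
--     return (6, 6)
-- ===== SOURCE B (Python) =====
-- _DICE_TABLE = (
--     (1, 1),
--     (2, 1), (2, 2),
--     (3, 1), (3, 2), (3, 3),
--     (4, 1), (4, 2), (4, 3), (4, 4),
--     (5, 1), (5, 2), (5, 3), (5, 4), (5, 5),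
--     (6, 1), (6, 2), (6, 3), (6, 4), (6, 5), (6, 6),
-- )
--
--
-- def index_to_dice(idx):
--     """Convert index to dice roll."""
--     if 0 <= idx < 21:
--         return _DICE_TABLE[idx]
--     return (6, 6)
-- ===== Notes on version B (the rewrite author's own statement) =====
-- stated objective: simpler
-- what changed: Replaces the nested counting loops with a precomputed triangular table of all dice pairs and a single bounds-checked O(1) lookup.
import Mathlib
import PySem

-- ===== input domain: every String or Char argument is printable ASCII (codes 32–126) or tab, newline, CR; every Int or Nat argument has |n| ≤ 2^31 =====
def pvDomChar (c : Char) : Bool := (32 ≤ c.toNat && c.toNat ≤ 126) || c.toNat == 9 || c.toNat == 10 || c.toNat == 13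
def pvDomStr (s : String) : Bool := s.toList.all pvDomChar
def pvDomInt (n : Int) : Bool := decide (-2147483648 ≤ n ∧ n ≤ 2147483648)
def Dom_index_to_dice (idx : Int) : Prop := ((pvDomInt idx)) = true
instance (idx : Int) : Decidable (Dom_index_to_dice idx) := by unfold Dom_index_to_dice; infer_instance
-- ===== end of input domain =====

-- B replaces A's nested counting loops with a precomputed 21-entry table and one O(1) bounds-checked lookup (simpler).

-- ===== PORT A =====
-- inner 'for low in range(1, high+1)': returns the pair on count == idx, else the updated count
def idxDiceInner (idx high : Int) (lows : List Int) (count : Int) : Sum (Int × Int) Int :=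
  match lows with
  | [] => .inr count
  | low :: rest =>
      if count = idx then .inl (high, low)
      else idxDiceInner idx high rest (count + 1)

-- outer 'for high in range(1, 7)' threading count; falls through to (6, 6)
def idxDiceOuter (idx : Int) (highs : List Int) (count : Int) : Int × Int :=
  match highs with
  | [] => (6, 6)
  | high :: rest =>
      match idxDiceInner idx high (PySem.List.pyRange 1 (high + 1) 1) count with
      | .inl p => p
      | .inr c => idxDiceOuter idx rest c

def index_to_dice (idx : Int) : Int × Int :=
  idxDiceOuter idx (PySem.List.pyRange 1 7 1) 0

-- ===== PORT B =====
def diceTable : List (Int × Int) :=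
  [(1, 1),
   (2, 1), (2, 2),
   (3, 1), (3, 2), (3, 3),
   (4, 1), (4, 2), (4, 3), (4, 4),
   (5, 1), (5, 2), (5, 3), (5, 4), (5, 5),
   (6, 1), (6, 2), (6, 3), (6, 4), (6, 5), (6, 6)]

def index_to_dice_alt (idx : Int) : Int × Int :=
  if 0 ≤ idx ∧ idx < 21 then
    -- _DICE_TABLE[idx]: in range under the guard, so the none branch is unreachable
    match PySem.List.pyGet? diceTable idx with
    | some p => p
    | none => (6, 6)
  else (6, 6)

-- ===== PRECONDITION & SPEC =====
def Spec_index_to_dice (idx : Int) (out : Int × Int) : Prop := out = index_to_dice_alt idx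
instance (idx : Int) (out : Int × Int) : Decidable (Spec_index_to_dice idx out) := by unfold Spec_index_to_dice; infer_instance

-- ===== CLAIM (what is proved, stated in full; the proofs are below) =====
def Claim_equal_index_to_dice : Prop := ∀ (idx : Int), Dom_index_to_dice idx → Spec_index_to_dice idx (index_to_dice idx)

-- ===== LEMMAS AND PROOFS =====
theorem pvCountNeIdx (idx k : Int) (h : idx < 0 ∨ 21 ≤ idx) (h0 : 0 ≤ k) (h1 : k < 21) : (k = idx) = False := by
  simp only [eq_iff_iff, iff_false]
  omega

-- ===== VERDICT (by name: the statement is the Claim_ definition above) =====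
theorem index_to_dice_spec : Claim_equal_index_to_dice := by
  intro idx _
  show index_to_dice idx = index_to_dice_alt idx
  by_cases h : 0 ≤ idx ∧ idx < 21
  · obtain ⟨h0, h1⟩ := h
    interval_cases idx <;> decide
  · rw [index_to_dice_alt, if_neg h]
    rw [index_to_dice,
      show PySem.List.pyRange 1 7 1 = [1, 2, 3, 4, 5, 6] from by decide]
    simp only [idxDiceOuter,
      show PySem.List.pyRange 1 (1 + 1) 1 = [1] from by decide,
      show PySem.List.pyRange 1 (2 + 1) 1 = [1, 2] from by decide,
      show PySem.List.pyRange 1 (3 + 1) 1 = [1, 2, 3] from by decide,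
      show PySem.List.pyRange 1 (4 + 1) 1 = [1, 2, 3, 4] from by decide,
      show PySem.List.pyRange 1 (5 + 1) 1 = [1, 2, 3, 4, 5] from by decide,
      show PySem.List.pyRange 1 (6 + 1) 1 = [1, 2, 3, 4, 5, 6] from by decide,
      idxDiceInner]
    have h' : idx < 0 ∨ 21 ≤ idx := by omega
    simp [pvCountNeIdx idx _ h']
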